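-- pv_equiv track=rewrite | github.com/MrBrantCode/unitest_baseline | mut_generate/mist_train_cf/cf_45168/solution.py | sum_of_factorial_digits
-- ===== SOURCE A (Python) =====
-- def sum_of_factorial_digits(n):
--     if n == 0:
--         return [1]
--     else:
--         previous = sum_of_factorial_digits(n-1)
--         current_factorial = previous[-1] * n
--         sum_of_digits = sum(int(digit) for digit in str(current_factorial))
--         return previous + [sum_of_digits]
-- ===== SOURCE B (Python) =====
-- def sum_of_factorial_digits(n):
--     result = [1]
--     for k in range(1, n + 1):
--         sum_of_digits = sum(int(digit) for digit in str(result[-1] * k))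
--         result.append(sum_of_digits)
--     return result
-- ===== Notes on version B (the rewrite author's own statement) =====
-- stated objective: faster
-- what changed: Replaced the linear recursion, which rebuilds the whole list by concatenation at every unwinding and adds O(n) recursion depth, with a flat iterative loop over range(1, n+1) appending each digit sum to one accumulator.
import Mathlib
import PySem

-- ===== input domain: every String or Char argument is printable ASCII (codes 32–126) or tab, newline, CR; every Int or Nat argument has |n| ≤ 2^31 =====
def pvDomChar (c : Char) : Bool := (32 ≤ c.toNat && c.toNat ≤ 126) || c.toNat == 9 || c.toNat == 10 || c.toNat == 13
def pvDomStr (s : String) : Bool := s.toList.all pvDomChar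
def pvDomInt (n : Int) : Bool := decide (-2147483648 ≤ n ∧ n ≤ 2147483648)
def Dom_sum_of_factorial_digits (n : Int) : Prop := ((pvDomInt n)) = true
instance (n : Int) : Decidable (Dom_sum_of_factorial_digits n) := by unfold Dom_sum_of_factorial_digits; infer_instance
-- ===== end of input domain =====

-- B replaces A's linear recursion with a flat iterative loop (idiomatic decomposition; same per-step arithmetic).

-- sum(int(digit) for digit in str(m)) — used verbatim by both sources
def pyDigitSum (m : Int) : Int :=
  ((PySem.Int.toStr m).toList.map
    (fun digit => (PySem.Int.ofStr? (String.singleton digit)).getD 0)).sum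

-- ===== PORT A =====
-- A recurses on n-1; for n < 0 Python never terminates (RecursionError), excluded by Pre_;
-- the n < 0 branch below only makes the Lean recursion total and is never reached inside Pre_.
def sum_of_factorial_digits (n : Int) : List Int :=
  if n = 0 then [1]
  else if _h : n < 0 then []
  else
    let previous := sum_of_factorial_digits (n - 1)
    let current_factorial := (PySem.List.pyGet? previous (-1)).getD 0 * n
    let sum_of_digits := pyDigitSum current_factorial
    previous ++ [sum_of_digits]
termination_by n.toNat
decreasing_by omega

-- ===== PORT B =====
def sum_of_factorial_digits_alt (n : Int) : List Int :=
  (PySem.List.pyRange 1 (n + 1) 1).foldl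
    (fun result k =>
      result ++ [pyDigitSum ((PySem.List.pyGet? result (-1)).getD 0 * k)])
    [1]

-- ===== PRECONDITION & SPEC =====
-- Pre_ excludes n < 0, on which A infinitely recurses (RecursionError in Python).
def Pre_sum_of_factorial_digits (n : Int) : Prop := 0 ≤ n
instance (n : Int) : Decidable (Pre_sum_of_factorial_digits n) := by unfold Pre_sum_of_factorial_digits; infer_instance
def pvWitness_sum_of_factorial_digits : Int := 5

def Spec_sum_of_factorial_digits (n : Int) (out : List Int) : Prop := out = sum_of_factorial_digits_alt n
instance (n : Int) (out : List Int) : Decidable (Spec_sum_of_factorial_digits n out) := by unfold Spec_sum_of_factorial_digits; infer_instance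

-- ===== CLAIM (what is proved, stated in full; the proofs are below) =====
def Claim_equal_sum_of_factorial_digits : Prop := ∀ (n : Int), Dom_sum_of_factorial_digits n → Pre_sum_of_factorial_digits n → Spec_sum_of_factorial_digits n (sum_of_factorial_digits n)

-- ===== LEMMAS AND PROOFS =====
lemma alt_succ (m : Nat) :
    sum_of_factorial_digits_alt ((m : Int) + 1) =
      sum_of_factorial_digits_alt (m : Int) ++
        [pyDigitSum ((PySem.List.pyGet? (sum_of_factorial_digits_alt (m : Int)) (-1)).getD 0 * ((m : Int) + 1))] := by
  unfold sum_of_factorial_digits_alt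
  rw [PySem.List.pyRange_one_succ_right (by omega : (1 : Int) ≤ (m : Int) + 1), List.foldl_append]
  simp

lemma sofd_eq_on_nat : ∀ (m : Nat),
    sum_of_factorial_digits (m : Int) = sum_of_factorial_digits_alt (m : Int) := by
  intro m
  induction m with
  | zero =>
      simp [sum_of_factorial_digits, sum_of_factorial_digits_alt,
        PySem.List.pyRange_one_eq_nil]
  | succ m ih =>
      rw [sum_of_factorial_digits]
      have h0 : ((m : Int) + 1) ≠ 0 := by omega
      have hneg : ¬ ((m : Int) + 1 < 0) := by omega
      push_cast
      rw [if_neg h0, dif_neg hneg]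
      have hstep : ((m : Int) + 1) - 1 = (m : Int) := by ring
      rw [hstep, ih, alt_succ]

-- ===== VERDICT (by name: the statement is the Claim_ definition above) =====
theorem sum_of_factorial_digits_spec : Claim_equal_sum_of_factorial_digits := by
  intro n _ hpre
  unfold Spec_sum_of_factorial_digits
  obtain ⟨m, rfl⟩ := Int.eq_ofNat_of_zero_le hpre
  exact sofd_eq_on_nat m
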